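-- pv_equiv track=rewrite | github.com/r1me75/PXL-2TIN | Studdy Buddy/Sid Beyens/python/oef.py | heart_rate_difference
-- ===== SOURCE A (Python) =====
-- def get_number_of_participants(lijst):
--     return len(lijst[0])
--
-- def get_number_of_tests(lijst):
--     return len(lijst)
--
-- def heart_rate_difference(lijst):
--     hoogste_hartslagen = []
--     laagste_harstlagen = []
--     verschillen = []
--
--     for i in range(get_number_of_tests(lijst)):
--         for j in range(get_number_of_participants(lijst)):
--             if i > 0:
--                 if lijst[i][j] > hoogste_hartslagen[j]:
--                     hoogste_hartslagen[j] = lijst[i][j]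
--                 elif lijst[i][j] < laagste_harstlagen[j]:
--                     laagste_harstlagen[j] = lijst[i][j]
--
--             hoogste_hartslagen.append(lijst[i][j])
--             laagste_harstlagen.append(lijst[i][j])
--
--     for j in range(get_number_of_participants(lijst)):
--         verschillen.append(hoogste_hartslagen[j] - laagste_harstlagen[j])
--
--     return verschillen
-- ===== SOURCE B (Python) =====
-- def heart_rate_difference(lijst):
--     participants = len(lijst[0])
--     tests = len(lijst)
--     verschillen = []
--     for j in range(participants):
--         kolom = [lijst[i][j] for i in range(tests)]
--         verschillen.append(max(kolom) - min(kolom))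
--     return verschillen
-- ===== Notes on version B (the rewrite author's own statement) =====
-- stated objective: simpler
-- what changed: B traverses column-major with one max() and one min() reduction per participant, instead of A's row-major pass that maintains running max/min lists it keeps appending to; A's quadratic-size scratch lists disappear.
import Mathlib
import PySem

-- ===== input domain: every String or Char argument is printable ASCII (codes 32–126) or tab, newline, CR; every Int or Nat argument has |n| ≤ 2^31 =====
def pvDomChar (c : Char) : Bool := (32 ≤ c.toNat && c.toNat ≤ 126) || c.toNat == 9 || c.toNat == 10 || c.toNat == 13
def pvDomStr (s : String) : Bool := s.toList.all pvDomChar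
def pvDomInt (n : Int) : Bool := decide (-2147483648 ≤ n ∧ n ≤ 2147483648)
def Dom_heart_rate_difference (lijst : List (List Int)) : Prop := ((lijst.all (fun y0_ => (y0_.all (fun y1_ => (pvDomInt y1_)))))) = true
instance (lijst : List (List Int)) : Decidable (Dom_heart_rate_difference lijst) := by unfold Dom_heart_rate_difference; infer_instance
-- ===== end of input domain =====

-- B replaces A's row-major running-max/min pass (with its ever-growing scratch lists) by one
-- max and one min reduction per participant's column: simpler, same exact results.

-- ===== PORT A =====
def get_number_of_participants (lijst : List (List Int)) : Int :=
  -- len(lijst[0]); lijst[0] raises IndexError on [] in Python, excluded by Pre_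
  PySem.List.len (PySem.List.pyGetD lijst 0 [])

def get_number_of_tests (lijst : List (List Int)) : Int :=
  PySem.List.len lijst

-- the body of A's inner 'for j' loop, named so the folds can be reasoned about;
-- all indices are in range under Pre_, so the pyGetD/pySetD defaults are never used there
def hrStep (lijst : List (List Int)) (i : Int) (st : List Int × List Int) (j : Int) :
    List Int × List Int :=
  let v := PySem.List.pyGetD (PySem.List.pyGetD lijst i []) j 0
  let st2 :=
    if i > 0 then
      if v > PySem.List.pyGetD st.1 j 0 then (PySem.List.pySetD st.1 j v, st.2)
      else if v < PySem.List.pyGetD st.2 j 0 then (st.1, PySem.List.pySetD st.2 j v)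
      else st
    else st
  (st2.1 ++ [v], st2.2 ++ [v])

def heart_rate_difference (lijst : List (List Int)) : List Int :=
  let st := (PySem.List.pyRange 0 (get_number_of_tests lijst) 1).foldl
    (fun st i =>
      (PySem.List.pyRange 0 (get_number_of_participants lijst) 1).foldl (hrStep lijst i) st)
    ([], [])
  (PySem.List.pyRange 0 (get_number_of_participants lijst) 1).foldl
    (fun verschillen j =>
      verschillen ++ [PySem.List.pyGetD st.1 j 0 - PySem.List.pyGetD st.2 j 0]) []

-- ===== PORT B =====
def heart_rate_difference_alt (lijst : List (List Int)) : List Int :=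
  let participants := PySem.List.len (PySem.List.pyGetD lijst 0 [])
  let tests := PySem.List.len lijst
  (PySem.List.pyRange 0 participants 1).map (fun j =>
    let kolom := (PySem.List.pyRange 0 tests 1).map
      (fun i => PySem.List.pyGetD (PySem.List.pyGetD lijst i []) j 0)
    (PySem.List.max? kolom (fun x => x)).getD 0 - (PySem.List.min? kolom (fun x => x)).getD 0)

-- ===== PRECONDITION & SPEC =====
-- Pre_ excludes exactly the inputs on which the Python A raises IndexError: the empty list
-- (lijst[0]) and ragged inputs with a row shorter than the first row (lijst[i][j]).
def Pre_heart_rate_difference (lijst : List (List Int)) : Prop :=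
  lijst ≠ [] ∧ ∀ r ∈ lijst, (lijst.headD []).length ≤ r.length
instance (lijst : List (List Int)) : Decidable (Pre_heart_rate_difference lijst) := by
  unfold Pre_heart_rate_difference; infer_instance

def pvWitness_heart_rate_difference : List (List Int) := [[60, 120], [75, 110], [68, 130]]

def Spec_heart_rate_difference (lijst : List (List Int)) (out : List Int) : Prop :=
  out = heart_rate_difference_alt lijst
instance (lijst : List (List Int)) (out : List Int) :
    Decidable (Spec_heart_rate_difference lijst out) := by
  unfold Spec_heart_rate_difference; infer_instance

-- ===== CLAIM (what is proved, stated in full; the proofs are below) =====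
def Claim_equal_heart_rate_difference : Prop :=
  ∀ (lijst : List (List Int)), Dom_heart_rate_difference lijst →
    Pre_heart_rate_difference lijst →
    Spec_heart_rate_difference lijst (heart_rate_difference lijst)

-- ===== LEMMAS AND PROOFS =====

-- lijst[i][j] as both ports read it (Nat indices)
def vA (lijst : List (List Int)) (i j : Nat) : Int :=
  PySem.List.pyGetD (PySem.List.pyGetD lijst (i : Int) []) (j : Int) 0

-- running max / min of column j over rows 0..m (inclusive)
def colMax (lijst : List (List Int)) (m j : Nat) : Int :=
  ((List.range m).map (fun t => vA lijst (t + 1) j)).foldl max (vA lijst 0 j)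

def colMin (lijst : List (List Int)) (m j : Nat) : Int :=
  ((List.range m).map (fun t => vA lijst (t + 1) j)).foldl min (vA lijst 0 j)

lemma foldl_pyRange_nat {β : Type} (n : Nat) (f : β → Int → β) (init : β) :
    (PySem.List.pyRange 0 (n : Int) 1).foldl f init
      = (List.range n).foldl (fun st (k : Nat) => f st (k : Int)) init := by
  rw [PySem.List.pyRange_one, List.foldl_map]
  simp only [zero_add, sub_zero, Int.toNat_natCast]

lemma map_pyRange_nat {β : Type} (n : Nat) (f : Int → β) :
    (PySem.List.pyRange 0 (n : Int) 1).map f = (List.range n).map (fun (k : Nat) => f (k : Int)) := by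
  rw [PySem.List.pyRange_one, List.map_map]
  simp only [Function.comp_def, zero_add, sub_zero, Int.toNat_natCast]

lemma pyGetD_append_left (X : List Int) (v : Int) (j : Nat) (hj : j < X.length) :
    PySem.List.pyGetD (X ++ [v]) (j : Int) 0 = PySem.List.pyGetD X (j : Int) 0 := by
  rw [PySem.List.pyGetD_natCast, PySem.List.pyGetD_natCast]
  simp [List.getD, List.getElem?_append_left hj]

lemma colMax_succ (lijst : List (List Int)) (m j : Nat) :
    colMax lijst (m + 1) j = max (colMax lijst m j) (vA lijst (m + 1) j) := by
  unfold colMax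
  rw [List.range_succ]
  simp [List.foldl_append]

lemma colMin_succ (lijst : List (List Int)) (m j : Nat) :
    colMin lijst (m + 1) j = min (colMin lijst m j) (vA lijst (m + 1) j) := by
  unfold colMin
  rw [List.range_succ]
  simp [List.foldl_append]

lemma colMin_le_colMax (lijst : List (List Int)) (m j : Nat) :
    colMin lijst m j ≤ colMax lijst m j := by
  induction m with
  | zero => simp [colMin, colMax]
  | succ m ih =>
      rw [colMin_succ, colMax_succ]
      exact le_trans (min_le_min_right _ ih) (min_le_max)

-- row 0 (i = 0): the inner loop just appends the first row's values
lemma row0_fold (lijst : List (List Int)) (m : Nat) :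
    (List.range m).foldl (fun st (k : Nat) => hrStep lijst ((0 : Nat) : Int) st (k : Int))
        (([], []) : List Int × List Int)
      = ((List.range m).map (vA lijst 0), (List.range m).map (vA lijst 0)) := by
  induction m with
  | zero => simp
  | succ m ih =>
      rw [List.range_succ, List.foldl_append]
      simp only [List.foldl_cons, List.foldl_nil, ih]
      simp [hrStep, vA]

-- one inner step at row i ≥ 1, column m: the tracked slots become running max / min
lemma hrStep_ge1 (lijst : List (List Int)) (i : Nat) (hi : 1 ≤ i)
    (st : List Int × List Int) (m : Nat) :
    hrStep lijst (i : Int) st (m : Int)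
      = (let v := vA lijst i m
         let st2 :=
           if v > PySem.List.pyGetD st.1 (m : Int) 0 then (PySem.List.pySetD st.1 (m : Int) v, st.2)
           else if v < PySem.List.pyGetD st.2 (m : Int) 0 then (st.1, PySem.List.pySetD st.2 (m : Int) v)
           else st
         (st2.1 ++ [v], st2.2 ++ [v])) := by
  have hpos : ((i : Int) > 0) := by exact_mod_cast hi
  simp only [hrStep, vA, if_pos hpos]

-- the inner loop, rows i ≥ 1: after m steps the first m slots hold max/min of (old, v), the
-- rest are untouched, and both lists grew by m
lemma inner_fold (lijst : List (List Int)) (i : Nat) (hi : 1 ≤ i) (c : Nat)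
    (h l : List Int) (hlen : c ≤ h.length) (llen : c ≤ l.length)
    (ord : ∀ j, j < c → PySem.List.pyGetD l (j : Int) 0 ≤ PySem.List.pyGetD h (j : Int) 0) :
    ∀ m, m ≤ c →
      ((List.range m).foldl (fun st (k : Nat) => hrStep lijst (i : Int) st (k : Int)) (h, l)).1.length
          = h.length + m ∧
      ((List.range m).foldl (fun st (k : Nat) => hrStep lijst (i : Int) st (k : Int)) (h, l)).2.length
          = l.length + m ∧
      ∀ j, j < c →
        PySem.List.pyGetD
            ((List.range m).foldl (fun st (k : Nat) => hrStep lijst (i : Int) st (k : Int)) (h, l)).1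
            (j : Int) 0
          = (if j < m then max (PySem.List.pyGetD h (j : Int) 0) (vA lijst i j)
             else PySem.List.pyGetD h (j : Int) 0) ∧
        PySem.List.pyGetD
            ((List.range m).foldl (fun st (k : Nat) => hrStep lijst (i : Int) st (k : Int)) (h, l)).2
            (j : Int) 0
          = (if j < m then min (PySem.List.pyGetD l (j : Int) 0) (vA lijst i j)
             else PySem.List.pyGetD l (j : Int) 0) := by
  intro m
  induction m with
  | zero => intro _; simp
  | succ m ih =>
      intro hmc
      have hmc' : m ≤ c := Nat.le_of_succ_le hmc
      have hmlt : m < c := hmc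
      obtain ⟨len1, len2, props⟩ := ih hmc'
      set st := (List.range m).foldl (fun st (k : Nat) => hrStep lijst (i : Int) st (k : Int)) (h, l)
        with hst
      have hget1 : PySem.List.pyGetD st.1 (m : Int) 0 = PySem.List.pyGetD h (m : Int) 0 := by
        have := (props m hmlt).1; simpa using this
      have hget2 : PySem.List.pyGetD st.2 (m : Int) 0 = PySem.List.pyGetD l (m : Int) 0 := by
        have := (props m hmlt).2; simpa using this
      have hm1 : m < st.1.length := by omega
      have hm2 : m < st.2.length := by omega
      rw [List.range_succ, List.foldl_append]
      simp only [List.foldl_cons, List.foldl_nil, ← hst]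
      rw [hrStep_ge1 lijst i hi st m]
      simp only []
      set v := vA lijst i m with hv
      have hordm : PySem.List.pyGetD l (m : Int) 0 ≤ PySem.List.pyGetD h (m : Int) 0 :=
        ord m hmlt
      -- the three branches
      split_ifs with h1 h2
      · -- v > h_m : max slot updated to v, min slot untouched
        refine ⟨by simp [PySem.List.pySetD_natCast, len1]; omega, by simp [len2]; omega, ?_⟩
        intro j hj
        have hj1 : j < (PySem.List.pySetD st.1 (m : Int) v).length := by
          simp [PySem.List.pySetD_natCast]; omega
        have hj2 : j < st.2.length := by omega
        rw [hget1] at h1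
        constructor
        · rw [pyGetD_append_left _ _ _ hj1,
            PySem.List.pyGetD_pySetD_natCast st.1 m j v 0 hm1]
          by_cases hjm : j = m
          · subst hjm
            rw [if_pos rfl, if_pos (Nat.lt_succ_self _), ← hv]
            exact (max_eq_right (le_of_lt h1)).symm
          · rw [if_neg hjm, (props j hj).1]
            by_cases hlt : j < m
            · rw [if_pos hlt, if_pos (by omega)]
            · rw [if_neg hlt, if_neg (by omega)]
        · rw [pyGetD_append_left _ _ _ hj2, (props j hj).2]
          by_cases hjm : j = m
          · subst hjm
            rw [if_neg (by omega), if_pos (by omega)]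
            exact (min_eq_left (le_of_lt (lt_of_le_of_lt hordm h1))).symm
          · by_cases hlt : j < m
            · rw [if_pos hlt, if_pos (by omega)]
            · rw [if_neg hlt, if_neg (by omega)]
      · -- v < l_m : min slot updated to v, max slot untouched
        refine ⟨by simp [len1]; omega, by simp [PySem.List.pySetD_natCast, len2]; omega, ?_⟩
        intro j hj
        have hj1 : j < st.1.length := by omega
        have hj2 : j < (PySem.List.pySetD st.2 (m : Int) v).length := by
          simp [PySem.List.pySetD_natCast]; omega
        rw [hget1] at h1
        rw [hget2] at h2
        constructor
        · rw [pyGetD_append_left _ _ _ hj1, (props j hj).1]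
          by_cases hjm : j = m
          · subst hjm
            rw [if_neg (by omega), if_pos (by omega)]
            exact (max_eq_left (le_of_not_gt h1)).symm
          · by_cases hlt : j < m
            · rw [if_pos hlt, if_pos (by omega)]
            · rw [if_neg hlt, if_neg (by omega)]
        · rw [pyGetD_append_left _ _ _ hj2,
            PySem.List.pyGetD_pySetD_natCast st.2 m j v 0 hm2]
          by_cases hjm : j = m
          · subst hjm
            rw [if_pos rfl, if_pos (Nat.lt_succ_self _), ← hv]
            exact (min_eq_right (le_of_lt h2)).symm
          · rw [if_neg hjm, (props j hj).2]
            by_cases hlt : j < m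
            · rw [if_pos hlt, if_pos (by omega)]
            · rw [if_neg hlt, if_neg (by omega)]
      · -- l_m ≤ v ≤ h_m : nothing updated
        refine ⟨by simp [len1]; omega, by simp [len2]; omega, ?_⟩
        intro j hj
        have hj1 : j < st.1.length := by omega
        have hj2 : j < st.2.length := by omega
        rw [hget1] at h1
        rw [hget2] at h2
        constructor
        · rw [pyGetD_append_left _ _ _ hj1, (props j hj).1]
          by_cases hjm : j = m
          · subst hjm
            rw [if_neg (by omega), if_pos (by omega)]
            exact (max_eq_left (le_of_not_gt h1)).symm
          · by_cases hlt : j < m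
            · rw [if_pos hlt, if_pos (by omega)]
            · rw [if_neg hlt, if_neg (by omega)]
        · rw [pyGetD_append_left _ _ _ hj2, (props j hj).2]
          by_cases hjm : j = m
          · subst hjm
            rw [if_neg (by omega), if_pos (by omega)]
            exact (min_eq_left (le_of_not_gt h2)).symm
          · by_cases hlt : j < m
            · rw [if_pos hlt, if_pos (by omega)]
            · rw [if_neg hlt, if_neg (by omega)]

-- the outer loop: after k ≥ 1 rows, slot j holds the column max / min over rows 0..k-1
lemma outer_fold (lijst : List (List Int)) (c : Nat) :
    ∀ k, 1 ≤ k →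
      ((List.range k).foldl
          (fun st (i : Nat) => (List.range c).foldl (fun st (t : Nat) => hrStep lijst (i : Int) st (t : Int)) st)
          (([], []) : List Int × List Int)).1.length = k * c ∧
      ((List.range k).foldl
          (fun st (i : Nat) => (List.range c).foldl (fun st (t : Nat) => hrStep lijst (i : Int) st (t : Int)) st)
          (([], []) : List Int × List Int)).2.length = k * c ∧
      ∀ j, j < c →
        PySem.List.pyGetD
            ((List.range k).foldl
              (fun st (i : Nat) => (List.range c).foldl (fun st (t : Nat) => hrStep lijst (i : Int) st (t : Int)) st)
              (([], []) : List Int × List Int)).1 (j : Int) 0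
          = colMax lijst (k - 1) j ∧
        PySem.List.pyGetD
            ((List.range k).foldl
              (fun st (i : Nat) => (List.range c).foldl (fun st (t : Nat) => hrStep lijst (i : Int) st (t : Int)) st)
              (([], []) : List Int × List Int)).2 (j : Int) 0
          = colMin lijst (k - 1) j := by
  intro k
  induction k with
  | zero => intro h; omega
  | succ k ih =>
      intro _
      by_cases hk : k = 0
      · subst hk
        rw [List.range_one]
        simp only [List.foldl_cons, List.foldl_nil]
        rw [row0_fold lijst c]
        refine ⟨by simp, by simp, ?_⟩
        intro j hj
        constructor
        · rw [PySem.List.pyGetD_natCast, PySem.List.getD_map_range _ _ _ _ hj]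
          simp [colMax]
        · rw [PySem.List.pyGetD_natCast, PySem.List.getD_map_range _ _ _ _ hj]
          simp [colMin]
      · have hk1 : 1 ≤ k := Nat.one_le_iff_ne_zero.mpr hk
        obtain ⟨len1, len2, props⟩ := ih hk1
        set st := (List.range k).foldl
          (fun st (i : Nat) => (List.range c).foldl (fun st (t : Nat) => hrStep lijst (i : Int) st (t : Int)) st)
          (([], []) : List Int × List Int) with hst
        rw [List.range_succ, List.foldl_append]
        simp only [List.foldl_cons, List.foldl_nil, ← hst]
        have hlen : c ≤ st.1.length := by rw [len1]; exact Nat.le_mul_of_pos_left c hk1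
        have llen : c ≤ st.2.length := by rw [len2]; exact Nat.le_mul_of_pos_left c hk1
        have ord : ∀ j, j < c →
            PySem.List.pyGetD st.2 (j : Int) 0 ≤ PySem.List.pyGetD st.1 (j : Int) 0 := by
          intro j hj
          rw [(props j hj).1, (props j hj).2]
          exact colMin_le_colMax lijst (k - 1) j
        obtain ⟨len1', len2', props'⟩ :=
          inner_fold lijst k hk1 c st.1 st.2 hlen llen ord c (le_refl c)
        refine ⟨by rw [len1', len1]; ring, by rw [len2', len2]; ring, ?_⟩
        intro j hj
        obtain ⟨k', rfl⟩ : ∃ k', k = k' + 1 := ⟨k - 1, by omega⟩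
        have hcolmax : colMax lijst (k' + 1) j = max (colMax lijst (k' + 1 - 1) j) (vA lijst (k' + 1) j) := by
          simp [colMax_succ]
        have hcolmin : colMin lijst (k' + 1) j = min (colMin lijst (k' + 1 - 1) j) (vA lijst (k' + 1) j) := by
          simp [colMin_succ]
        constructor
        · rw [(props' j hj).1, if_pos hj, (props j hj).1]
          simp [hcolmax]
        · rw [(props' j hj).2, if_pos hj, (props j hj).2]
          simp [hcolmin]

-- B's column extremum equals the running fold
lemma kolom_max (lijst : List (List Int)) (n' j : Nat) :
    (PySem.List.max?
        ((List.range (n' + 1)).map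
          (fun (t : Nat) => PySem.List.pyGetD (PySem.List.pyGetD lijst (t : Int) []) (j : Int) 0))
        (fun x => x)).getD 0 = colMax lijst n' j := by
  rw [List.range_succ_eq_map, List.map_cons, List.map_map, PySem.List.max?_id_cons,
    Option.getD_some]
  simp only [colMax, vA, Function.comp_def, Nat.succ_eq_add_one, Nat.cast_zero]

lemma kolom_min (lijst : List (List Int)) (n' j : Nat) :
    (PySem.List.min?
        ((List.range (n' + 1)).map
          (fun (t : Nat) => PySem.List.pyGetD (PySem.List.pyGetD lijst (t : Int) []) (j : Int) 0))
        (fun x => x)).getD 0 = colMin lijst n' j := by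
  rw [List.range_succ_eq_map, List.map_cons, List.map_map, PySem.List.min?_id_cons,
    Option.getD_some]
  simp only [colMin, vA, Function.comp_def, Nat.succ_eq_add_one, Nat.cast_zero]

-- ===== VERDICT (by name: the statement is the Claim_ definition above) =====
theorem heart_rate_difference_spec : Claim_equal_heart_rate_difference := by
  intro lijst _hdom hpre
  obtain ⟨hne, _hrag⟩ := hpre
  unfold Spec_heart_rate_difference
  obtain ⟨n', hn⟩ : ∃ n', lijst.length = n' + 1 := by
    cases lijst with
    | nil => exact absurd rfl hne
    | cons a t => exact ⟨t.length, by simp⟩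
  simp only [heart_rate_difference, heart_rate_difference_alt, get_number_of_tests,
    get_number_of_participants, PySem.List.len_eq]
  simp only [foldl_pyRange_nat, map_pyRange_nat]
  set c := (PySem.List.pyGetD lijst 0 []).length
  rw [hn]
  obtain ⟨_, _, props⟩ := outer_fold lijst c (n' + 1) (by omega)
  rw [PySem.List.foldl_append_singleton_eq_map, List.nil_append]
  apply List.map_congr_left
  intro j hj
  have hjc : j < c := List.mem_range.mp hj
  rw [(props j hjc).1, (props j hjc).2]
  rw [kolom_max lijst n' j, kolom_min lijst n' j]
  simp
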